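-- pv_equiv track=rewrite | github.com/IvanKalug-QA/codewars | Bob's_Short_Forms.py | short_form
-- ===== SOURCE A (Python) =====
-- def short_form(s):
--     vowel = {"a", "e", "i", "o", "u"}
--     result = [s[0]]
--     for i in range(1, len(s) - 1):
--         if s[i].lower() not in vowel:
--             result.append(s[i])
--     result.append(s[-1])
--     return "".join(result)
-- ===== SOURCE B (Python) =====
-- def short_form(s):
--     inner = s[1:-1]
--     for v in "aeiouAEIOU":
--         inner = inner.replace(v, "")
--     return s[0] + inner + s[-1]
-- ===== Notes on version B (the rewrite author's own statement) =====
-- stated objective: alternative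
-- what changed: Instead of A's single Python-level pass over the string indices with a per-character lowercase+set-membership test, B loops over the vowel alphabet and makes ten staged str.replace passes over the interior slice, each deleting one vowel letter.
-- outside the precondition, e.g. on short_form(''): A raises IndexError, B raises IndexError
import Mathlib
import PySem

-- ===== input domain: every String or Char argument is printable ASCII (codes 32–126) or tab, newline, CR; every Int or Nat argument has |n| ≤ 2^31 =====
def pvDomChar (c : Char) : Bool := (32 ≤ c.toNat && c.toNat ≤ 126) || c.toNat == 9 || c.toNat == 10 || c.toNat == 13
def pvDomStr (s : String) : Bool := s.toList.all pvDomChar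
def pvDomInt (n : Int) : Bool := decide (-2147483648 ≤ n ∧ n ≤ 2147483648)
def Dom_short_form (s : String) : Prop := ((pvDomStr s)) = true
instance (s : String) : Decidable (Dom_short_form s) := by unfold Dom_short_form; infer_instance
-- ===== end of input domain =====

-- B replaces A's single index loop (per-character lowercase + vowel-set test) by ten staged
-- str.replace passes over the interior slice s[1:-1], one per vowel letter; proved equal on
-- non-empty strings. (Python's one-character strings s[i] are modelled as Char.)

-- ===== PORT A =====
def pvVowel : PySem.Set Char := PySem.Set.ofList ['a', 'e', 'i', 'o', 'u']

def short_form (s : String) : String :=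
  let cs := s.toList
  let result : List Char := [PySem.List.pyGetD cs 0 ' ']
  let result := (PySem.List.pyRange 1 ((cs.length : Int) - 1) 1).foldl
    (fun acc i =>
      if !(PySem.Set.contains pvVowel (PySem.Chars.lowerChar (PySem.List.pyGetD cs i ' '))) then
        acc ++ [PySem.List.pyGetD cs i ' ']
      else acc) result
  let result := result ++ [PySem.List.pyGetD cs (-1) ' ']
  String.ofList result

-- ===== PORT B =====
-- for v in "aeiouAEIOU": inner = inner.replace(v, "")  — one full replace pass per vowel letter.
def short_form_alt (s : String) : String :=
  let cs := s.toList
  let inner := "aeiouAEIOU".toList.foldl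
    (fun acc v => PySem.Chars.replace acc [v] [])
    (PySem.List.slice cs (some 1) (some (-1)))
  String.ofList ([PySem.List.pyGetD cs 0 ' '] ++ inner ++ [PySem.List.pyGetD cs (-1) ' '])

-- ===== PRECONDITION & SPEC =====
-- Pre_ excludes only the empty string, on which A (and B alike) raise IndexError at s[0].
def Pre_short_form (s : String) : Prop := s ≠ ""
instance (s : String) : Decidable (Pre_short_form s) := by unfold Pre_short_form; infer_instance
def pvWitness_short_form : String := "Hello"

def Spec_short_form (s : String) (out : String) : Prop := out = short_form_alt s
instance (s : String) (out : String) : Decidable (Spec_short_form s out) := by unfold Spec_short_form; infer_instance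

-- ===== CLAIM (what is proved, stated in full; the proofs are below) =====
def Claim_equal_short_form : Prop := ∀ (s : String), Dom_short_form s → Pre_short_form s → Spec_short_form s (short_form s)

-- ===== LEMMAS AND PROOFS =====

theorem char_eq_toNat (a b : Char) : a = b ↔ a.toNat = b.toNat := by
  constructor
  · intro h; rw [h]
  · intro h; apply Char.ext; exact UInt32.toNat_inj.mp h

theorem charA_le (c : Char) : ('A' ≤ c) ↔ 65 ≤ c.toNat := by
  rw [Char.le_def, UInt32.le_iff_toNat_le]; rfl

theorem char_le_Z (c : Char) : (c ≤ 'Z') ↔ c.toNat ≤ 90 := by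
  rw [Char.le_def, UInt32.le_iff_toNat_le]; rfl

theorem ofNat32 (c : Char) (h : c.toNat ≤ 90) : (Char.ofNat (c.toNat + 32)).toNat = c.toNat + 32 := by
  rw [Char.toNat_ofNat, if_pos]; exact Or.inl (by omega)

-- A's test `s[i].lower() not in vowel` agrees with membership in the ten vowel letters
theorem pred_eq (c : Char) :
    (!(PySem.Set.contains pvVowel (PySem.Chars.lowerChar c)))
      = (!("aeiouAEIOU".toList.contains c)) := by
  have hv : pvVowel = ['a', 'e', 'i', 'o', 'u'] := by decide
  have hs : "aeiouAEIOU".toList = ['a','e','i','o','u','A','E','I','O','U'] := by decide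
  have h : PySem.Set.contains pvVowel (PySem.Chars.lowerChar c) = "aeiouAEIOU".toList.contains c := by
    rw [Bool.eq_iff_iff]
    simp only [PySem.Set.contains, hv, hs, List.contains_iff_mem, List.mem_cons,
      List.not_mem_nil, or_false, char_eq_toNat, PySem.Chars.lowerChar, PySem.Chars.isupper,
      show ('a':Char).toNat = 97 from rfl, show ('e':Char).toNat = 101 from rfl,
      show ('i':Char).toNat = 105 from rfl, show ('o':Char).toNat = 111 from rfl,
      show ('u':Char).toNat = 117 from rfl, show ('A':Char).toNat = 65 from rfl,
      show ('E':Char).toNat = 69 from rfl, show ('I':Char).toNat = 73 from rfl,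
      show ('O':Char).toNat = 79 from rfl, show ('U':Char).toNat = 85 from rfl]
    by_cases hu : 'A' ≤ c ∧ c ≤ 'Z'
    · rw [if_pos (by simp [hu.1, hu.2])]
      rw [ofNat32 c ((char_le_Z c).mp hu.2)]
      have h1 := (charA_le c).mp hu.1
      have h2 := (char_le_Z c).mp hu.2
      omega
    · rw [if_neg (by simp only [Bool.and_eq_true, decide_eq_true_eq]; exact hu)]
      rw [charA_le, char_le_Z] at hu
      omega
  rw [h]

-- one replace pass with a single deleted character is the corresponding filter
theorem replace_go_filter (v : Char) (fuel : Nat) (l acc : List Char) (h : l.length ≤ fuel) :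
    PySem.Chars.replace.go [v] [] fuel l acc = acc.reverse ++ l.filter (fun c => !(c == v)) := by
  induction fuel generalizing l acc with
  | zero =>
    have : l = [] := List.length_eq_zero_iff.mp (Nat.le_zero.mp h)
    subst this
    simp [PySem.Chars.replace.go]
  | succ n ih =>
    cases l with
    | nil => simp [PySem.Chars.replace.go]
    | cons c t =>
      simp only [PySem.Chars.replace.go]
      by_cases hc : c = v
      · subst hc
        rw [if_pos (by simp [List.isPrefixOf])]
        have hd : List.drop [c].length (c :: t) = t := rfl
        simp only [List.reverse_nil, List.nil_append]
        rw [hd, ih t acc (by simp at h; omega)]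
        simp
      · rw [if_neg (by simp [List.isPrefixOf]; exact fun e : v = c => hc e.symm)]
        rw [ih t (c :: acc) (by simp at h; omega)]
        simp [hc]

theorem replace_filter (v : Char) (l : List Char) :
    PySem.Chars.replace l [v] [] = l.filter (fun c => !(c == v)) := by
  rw [PySem.Chars.replace]
  rw [if_neg (by simp)]
  simpa using replace_go_filter v l.length l [] (le_refl _)

-- the staged passes over the vowel alphabet delete exactly the vowel letters
theorem foldl_replace_eq_filter (vs xs : List Char) :
    vs.foldl (fun acc v => PySem.Chars.replace acc [v] []) xs
      = xs.filter (fun c => !(vs.contains c)) := by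
  induction vs generalizing xs with
  | nil => simp
  | cons v vs ih =>
    rw [List.foldl_cons, replace_filter, ih, List.filter_filter]
    apply List.filter_congr
    intro c _
    by_cases hcv : c = v
    · subst hcv; simp
    · simp [hcv, Bool.and_comm]

-- A's interior loop collects exactly the interior slice with vowels filtered out
theorem fold_eq_filter (cs : List Char) (acc : List Char) :
    (PySem.List.pyRange 1 ((cs.length : Int) - 1) 1).foldl
      (fun acc i =>
        if !(PySem.Set.contains pvVowel (PySem.Chars.lowerChar (PySem.List.pyGetD cs i ' '))) then
          acc ++ [PySem.List.pyGetD cs i ' ']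
        else acc) acc
    = acc ++ (PySem.List.slice cs (some 1) (some (-1))).filter
        (fun c => !("aeiouAEIOU".toList.contains c)) := by
  rcases cs with _ | ⟨x, xs⟩
  · rw [PySem.List.pyRange_one_eq_nil (by norm_num)]
    simp [PySem.List.slice]
  · set cs := x :: xs with hcs
    have hn : 1 ≤ cs.length := by simp [hcs]
    set ys := cs.take (cs.length - 1) with hys
    have hyl : ys.length = cs.length - 1 := by simp [hys]
    have hb : ((cs.length : Int) - 1) = (ys.length : Int) := by
      rw [hyl]; omega
    have hswap : ∀ (acc : List Char) (i : Int), i ∈ PySem.List.pyRange 1 ((cs.length : Int) - 1) 1 →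
        (fun acc i =>
          if !(PySem.Set.contains pvVowel (PySem.Chars.lowerChar (PySem.List.pyGetD cs i ' '))) then
            acc ++ [PySem.List.pyGetD cs i ' ']
          else acc) acc i
        = (fun acc i =>
          if !(PySem.Set.contains pvVowel (PySem.Chars.lowerChar (PySem.List.pyGetD ys i ' '))) then
            acc ++ [PySem.List.pyGetD ys i ' ']
          else acc) acc i := by
      intro acc i hi
      rw [PySem.List.mem_pyRange_one] at hi
      have h0 : (0:Int) ≤ i := by omega
      have hlt : i < (ys.length : Int) := by omega
      have hlt' : i < (cs.length : Int) := by omega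
      have : PySem.List.pyGetD cs i ' ' = PySem.List.pyGetD ys i ' ' := by
        rw [PySem.List.pyGetD_eq_getElem cs ' ' h0 hlt', PySem.List.pyGetD_eq_getElem ys ' ' h0 hlt]
        simp only [hys, List.getElem_take]
      simp only [this]
    rw [PySem.List.foldl_congr_mem _ _ _ _ hswap, hb,
      PySem.List.foldl_pyRange_pyGetD' ys ' '
        (fun acc c => if !(PySem.Set.contains pvVowel (PySem.Chars.lowerChar c)) then acc ++ [c] else acc)
        acc (by norm_num)]
    simp only [pred_eq]
    rw [PySem.List.foldl_append_if_eq_filter]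
    congr 1
    simp only [PySem.List.slice, hys]
    have hc1 : PySem.List.clampIdx cs.length 1 = 1 := by
      simp [PySem.List.clampIdx]; omega
    rw [hc1, PySem.List.clampIdx_neg_one, show Int.toNat 1 = 1 from rfl, List.drop_take]

-- ===== VERDICT (by name: the statement is the Claim_ definition above) =====
theorem short_form_spec : Claim_equal_short_form := by
  intro s _ _
  unfold Spec_short_form short_form short_form_alt
  simp only [fold_eq_filter, foldl_replace_eq_filter, List.singleton_append]
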